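-- pv_equiv track=rewrite | github.com/chandragupta0001/Image_caption_ml | preprocess.py | laod_description
-- ===== SOURCE A (Python) =====
-- def laod_description(doc):
--     mapping=dict()
--     for line in doc.split('\n'):
--         if len(line)<2:
--             continue
--         tokens=line.split()
--         image_id , image_desc= tokens[0],tokens[1:]
--         image_id=image_id.split('.')[0]
--         image_desc=' '.join(image_desc)
--
--         if image_id not in mapping:
--             mapping[image_id]=image_desc
--     return mapping
-- ===== SOURCE B (Python) =====
-- def laod_description(doc):
--     pairs = []
--     for line in doc.split('\n'):
--         if len(line) >= 2:
--             tokens = line.split()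
--             pairs.append((tokens[0].split('.')[0], ' '.join(tokens[1:])))
--     firsts = {}
--     for key, desc in reversed(pairs):
--         firsts[key] = desc
--     return {key: firsts[key] for key, _ in pairs}
-- ===== Notes on version B (the rewrite author's own statement) =====
-- stated objective: alternative
-- what changed: B replaces A's single forward loop with its membership-guarded insert by three staged passes: parse all kept lines into a pair list, build the value map by iterating that list in REVERSE with unconditional last-wins overwrites (so the first occurrence's value survives without any membership test), then emit the keys in first-seen order with a final dict comprehension over the pair list.
import Mathlib
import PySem

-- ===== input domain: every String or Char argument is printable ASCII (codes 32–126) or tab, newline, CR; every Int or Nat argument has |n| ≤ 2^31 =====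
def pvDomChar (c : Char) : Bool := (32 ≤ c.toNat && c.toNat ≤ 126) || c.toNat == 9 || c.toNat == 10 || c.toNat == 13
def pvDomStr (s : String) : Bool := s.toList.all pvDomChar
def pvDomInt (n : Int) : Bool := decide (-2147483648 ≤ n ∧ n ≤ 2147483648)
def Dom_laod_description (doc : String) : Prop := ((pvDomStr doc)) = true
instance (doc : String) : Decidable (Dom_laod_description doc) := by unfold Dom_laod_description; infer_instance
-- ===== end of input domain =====

-- B stages the work: parse all kept lines into a pair list, build the value map by a REVERSE pass with
-- unconditional overwrite (last-wins over the reversed list = first occurrence wins, no membership test),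
-- then emit keys in first-seen order by a final comprehension over the pair list (objective: alternative).

-- ===== PORT A =====
def laod_description (doc : String) : List (String × String) :=
  (((PySem.Str.split? doc "\n").getD []).foldl
    (fun (mapping : PySem.Dict String String) line =>
      if PySem.Str.len line < 2 then mapping
      else
        let tokens := PySem.Str.split₀ line
        let image_id0 := PySem.List.pyGetD tokens 0 ""     -- tokens[0]; IndexError excluded by Pre_
        let image_desc0 := PySem.List.slice tokens (some 1) none
        let image_id := PySem.List.pyGetD ((PySem.Str.split? image_id0 ".").getD []) 0 ""
        let image_desc := PySem.Str.join " " image_desc0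
        if !(mapping.contains image_id) then mapping.insert image_id image_desc else mapping)
    PySem.Dict.empty).items

-- ===== PORT B =====
-- (tokens[0].split('.')[0], ' '.join(tokens[1:])) for one kept line (tokens[0]; IndexError excluded by Pre_)
def pvParse (line : String) : String × String :=
  let tokens := PySem.Str.split₀ line
  (PySem.List.pyGetD ((PySem.Str.split? (PySem.List.pyGetD tokens 0 "") ".").getD []) 0 "",
   PySem.Str.join " " (PySem.List.slice tokens (some 1) none))

def laod_description_alt (doc : String) : List (String × String) :=
  let pairs := ((PySem.Str.split? doc "\n").getD []).foldl
    (fun (acc : List (String × String)) line =>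
      if 2 ≤ PySem.Str.len line then acc ++ [pvParse line] else acc) []
  let firsts := pairs.reverse.foldl
    (fun (d : PySem.Dict String String) p => d.insert p.1 p.2) PySem.Dict.empty
  -- {key: firsts[key] for key, _ in pairs}; firsts[key] is always present, ported as getD
  (pairs.foldl
    (fun (d : PySem.Dict String String) p => d.insert p.1 (firsts.getD p.1 "")) PySem.Dict.empty).items

-- ===== PRECONDITION & SPEC =====
-- Pre_ excludes exactly the documents with a line of length ≥ 2 consisting only of whitespace:
-- on those, Python A (and B) raises IndexError at tokens[0].
def Pre_laod_description (doc : String) : Prop :=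
  ∀ line ∈ (PySem.Str.split? doc "\n").getD [],
    PySem.Str.len line < 2 ∨ PySem.Str.split₀ line ≠ []

instance (doc : String) : Decidable (Pre_laod_description doc) := by
  unfold Pre_laod_description; infer_instance

def pvWitness_laod_description : String := "img1.jpg a dog\nimg1.jpg two dogs\nx\nimg2.png cat"

def Spec_laod_description (doc : String) (out : List (String × String)) : Prop :=
  out = laod_description_alt doc
instance (doc : String) (out : List (String × String)) : Decidable (Spec_laod_description doc out) := by unfold Spec_laod_description; infer_instance

-- ===== CLAIM (what is proved, stated in full; the proofs are below) =====
def Claim_equal_laod_description : Prop := ∀ (doc : String), Dom_laod_description doc → Pre_laod_description doc → Spec_laod_description doc (laod_description doc)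

-- ===== LEMMAS AND PROOFS =====

-- A's loop body on one parsed pair: first-wins guarded insert
def pvStepA (m : PySem.Dict String String) (p : String × String) : PySem.Dict String String :=
  if !(m.contains p.1) then m.insert p.1 p.2 else m

-- inserting the value a key already has changes nothing
theorem pv_insert_self (d : PySem.Dict String String) (k v : String)
    (hnd : d.keys.Nodup) (h : d.get? k = some v) : d.insert k v = d := by
  apply PySem.Dict.ext
  have hc : d.contains k = true := by
    rw [PySem.Dict.contains_eq_isSome_get?, h]; rfl
  rw [PySem.Dict.items_insert_of_contains _ _ hc]
  have : ∀ p ∈ d.items, (if p.1 == k then (k, v) else p) = p := by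
    intro p hp
    by_cases hk : p.1 = k
    · subst hk
      have := PySem.Dict.get?_of_mem_items _ hp hnd
      rw [h] at this
      simp only [Option.some.injEq] at this
      simp [this]
    · simp [hk]
  rw [List.map_congr_left this]
  simp

-- lookup after a last-wins insert fold = first match in the reversed pair list
theorem pv_fold_insert_get? (qs : List (String × String)) (d : PySem.Dict String String)
    (k : String) :
    (qs.foldl (fun d p => d.insert p.1 p.2) d).get? k
      = (List.lookup k qs.reverse).or (d.get? k) := by
  induction qs generalizing d with
  | nil => simp
  | cons p qs ih =>
    simp only [List.foldl_cons, List.reverse_cons, ih, List.lookup_append]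
    by_cases hk : k = p.1
    · subst hk
      cases hl : (List.lookup p.1 qs.reverse) with
      | none => simp [List.lookup, PySem.Dict.get?_insert_self]
      | some w => simp
    · cases hl : (List.lookup k qs.reverse) with
      | none => simp [List.lookup, PySem.Dict.get?_insert_of_ne _ _ hk,
                      show (k == p.1) = false by simpa using hk]
      | some w => simp

-- the guarded first-wins fold equals the unconditional fold inserting f k, provided f
-- agrees with the first occurrence on new keys and with the accumulator on old ones
theorem pv_main (ps : List (String × String)) (f : String → String) :
    ∀ (d : PySem.Dict String String), d.keys.Nodup →
    (∀ k v, List.lookup k ps = some v → d.contains k = false → f k = v) →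
    (∀ p ∈ ps, d.contains p.1 = true → d.get? p.1 = some (f p.1)) →
    ps.foldl pvStepA d = ps.foldl (fun m p => m.insert p.1 (f p.1)) d := by
  induction ps with
  | nil => intro d _ _ _; rfl
  | cons p ps ih =>
    intro d hnd H1 H2
    simp only [List.foldl_cons]
    by_cases hc : d.contains p.1 = true
    · rw [show pvStepA d p = d by simp [pvStepA, hc],
          pv_insert_self d p.1 (f p.1) hnd (H2 p (by simp) hc)]
      apply ih d hnd
      · intro k v hl hk
        have hne : (k == p.1) = false := by
          by_contra h
          simp only [Bool.not_eq_false, beq_iff_eq] at h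
          rw [h, hc] at hk; cases hk
        apply H1 k v _ hk
        simp [List.lookup, hne, hl]
      · intro q hq; exact H2 q (by simp [hq])
    · have hc' : d.contains p.1 = false := by simpa using hc
      have hf : f p.1 = p.2 := H1 p.1 p.2 (by simp [List.lookup]) hc'
      rw [show pvStepA d p = d.insert p.1 p.2 by simp [pvStepA, hc'], hf]
      apply ih (d.insert p.1 p.2) (PySem.Dict.nodup_keys_insert d p.1 p.2 hnd)
      · intro k v hl hk
        have hne : k ≠ p.1 := by
          intro h; subst h
          rw [PySem.Dict.contains_insert_self] at hk; cases hk
        apply H1 k v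
        · simpa [List.lookup, show (k == p.1) = false by simpa using hne] using hl
        · rw [PySem.Dict.contains_insert] at hk
          simpa [show (k == p.1) = false by simpa using hne] using hk
      · intro q hq hqc
        by_cases hqk : q.1 = p.1
        · rw [hqk, PySem.Dict.get?_insert_self, hf]
        · rw [PySem.Dict.get?_insert_of_ne _ _ hqk]
          rw [PySem.Dict.contains_insert] at hqc
          exact H2 q (by simp [hq])
            (by simpa [show (q.1 == p.1) = false by simpa using hqk] using hqc)

-- first-wins fold over the pairs = B's insert fold using the reverse-built value map
theorem pv_AB_core (ps : List (String × String)) :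
    ps.foldl pvStepA PySem.Dict.empty
      = ps.foldl
          (fun (d : PySem.Dict String String) p =>
            d.insert p.1 ((ps.reverse.foldl
              (fun (d : PySem.Dict String String) p => d.insert p.1 p.2)
              PySem.Dict.empty).getD p.1 ""))
          PySem.Dict.empty := by
  apply pv_main ps
      (fun k => ((ps.reverse.foldl
        (fun (d : PySem.Dict String String) p => d.insert p.1 p.2)
        PySem.Dict.empty).getD k ""))
      PySem.Dict.empty PySem.Dict.nodup_keys_empty
  · intro k v hl _
    apply PySem.Dict.getD_of_get?_eq_some
    rw [pv_fold_insert_get?, List.reverse_reverse, hl]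
    rfl
  · intro q _ hqc
    rw [PySem.Dict.contains_empty] at hqc; cases hqc

-- A's whole computation = B's whole computation, over the common line list
theorem pv_AB (lines : List String) :
    (lines.foldl
      (fun (m : PySem.Dict String String) line =>
        if PySem.Str.len line < 2 then m else pvStepA m (pvParse line))
      PySem.Dict.empty).items
    = ((lines.foldl (fun (acc : List (String × String)) line =>
          if 2 ≤ PySem.Str.len line then acc ++ [pvParse line] else acc) []).foldl
        (fun (d : PySem.Dict String String) p =>
          d.insert p.1 (((lines.foldl (fun (acc : List (String × String)) line =>
              if 2 ≤ PySem.Str.len line then acc ++ [pvParse line] else acc) []).reverse.foldl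
            (fun (d : PySem.Dict String String) p => d.insert p.1 p.2)
            PySem.Dict.empty).getD p.1 ""))
        PySem.Dict.empty).items := by
  rw [PySem.List.foldl_congr_mem _ _
        (fun (acc : List (String × String)) line =>
          if decide (2 ≤ PySem.Str.len line) = true then acc ++ [pvParse line] else acc) _
        (by intro acc line _
            beta_reduce
            by_cases h : 2 ≤ PySem.Str.len line
            · rw [if_pos h, if_pos (show decide (2 ≤ PySem.Str.len line) = true by
                rw [decide_eq_true_eq]; exact h)]
            · rw [if_neg h, if_neg (show ¬decide (2 ≤ PySem.Str.len line) = true by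
                rw [decide_eq_true_eq]; exact h)]),
      PySem.List.foldl_append_if, List.nil_append,
      PySem.List.foldl_congr_mem _ _
        (fun (m : PySem.Dict String String) line =>
          if 2 ≤ PySem.Str.len line then pvStepA m (pvParse line) else m) _
        (by intro m line _
            beta_reduce
            rcases lt_or_ge (PySem.Str.len line) 2 with h | h
            · rw [if_pos h, if_neg (by omega)]
            · rw [if_neg (by omega), if_pos h]),
      PySem.List.foldl_ite_eq_foldl_filter, ← List.foldl_map, pv_AB_core]

-- ===== VERDICT (by name: the statement is the Claim_ definition above) =====
set_option maxHeartbeats 1000000 in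
theorem laod_description_spec : Claim_equal_laod_description := by
  intro doc _ _
  show laod_description doc = laod_description_alt doc
  unfold laod_description laod_description_alt
  exact pv_AB ((PySem.Str.split? doc "\n").getD [])
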